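-- pv_equiv track=rewrite | github.com/pypi-data/pypi-mirror-332 | packages/vibekit/vibekit-0.1.0-py3-none-any.whl/vibekit/vibekit/core/interpreter.py | _format_function_description
-- ===== SOURCE A (Python) =====
-- from typing import Any, Dict, List, Optional, Tuple, Union
--
-- def _format_function_description(
--
--     function_name: str,
--     args: Tuple[Any, ...],
--     kwargs: Dict[str, Any]
-- ) -> str:
--     """
--     Format a function call into a natural language description.
--
--     Args:
--         function_name: Name of the function
--         args: Positional arguments
--         kwargs: Keyword arguments
--
--     Returns:
--         Natural language description of the function call
--     """
--     # Convert snake_case to human-readable form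
--     readable_name = " ".join(function_name.split("_"))
--
--     # Format args and kwargs into strings
--     args_str = ", ".join(str(arg) for arg in args)
--     kwargs_str = ", ".join(f"{k}={v}" for k, v in kwargs.items())
--
--     # Combine all parameters
--     params_str = ""
--     if args_str and kwargs_str:
--         params_str = f"{args_str}, {kwargs_str}"
--     elif args_str:
--         params_str = args_str
--     elif kwargs_str:
--         params_str = kwargs_str
--
--     # Create the final description
--     if params_str:
--         return f"{readable_name} with parameters: {params_str}"
--     else:
--         return readable_name
-- ===== SOURCE B (Python) =====
-- def _format_function_description(function_name, args, kwargs):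
--     # Single-pass: char-wise underscore substitution for the name and one running
--     # optional accumulator for the parameter string (no staged joined strings, no cascade).
--     readable_name = "".join(" " if c == "_" else c for c in function_name)
--     params = None
--     for a in args:
--         if params is None:
--             params = str(a)
--         else:
--             params += ", " + str(a)
--     for k, v in kwargs.items():
--         if params is None:
--             params = f"{k}={v}"
--         else:
--             params += f", {k}={v}"
--     if params:
--         return f"{readable_name} with parameters: {params}"
--     return readable_name
-- ===== Notes on version B (the rewrite author's own statement) =====
-- stated objective: alternative
-- what changed: B streams: it rewrites the name character by character instead of split+join, and threads one optional accumulator through args and then kwargs to build the parameter string incrementally, so A's two intermediate joined strings and its four-way truthiness cascade disappear.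
-- outside the precondition, e.g. on _format_function_description('f', [''], {'k': 'v'}): A returns 'f with parameters: k=v', B returns 'f with parameters: , k=v'
import Mathlib
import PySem

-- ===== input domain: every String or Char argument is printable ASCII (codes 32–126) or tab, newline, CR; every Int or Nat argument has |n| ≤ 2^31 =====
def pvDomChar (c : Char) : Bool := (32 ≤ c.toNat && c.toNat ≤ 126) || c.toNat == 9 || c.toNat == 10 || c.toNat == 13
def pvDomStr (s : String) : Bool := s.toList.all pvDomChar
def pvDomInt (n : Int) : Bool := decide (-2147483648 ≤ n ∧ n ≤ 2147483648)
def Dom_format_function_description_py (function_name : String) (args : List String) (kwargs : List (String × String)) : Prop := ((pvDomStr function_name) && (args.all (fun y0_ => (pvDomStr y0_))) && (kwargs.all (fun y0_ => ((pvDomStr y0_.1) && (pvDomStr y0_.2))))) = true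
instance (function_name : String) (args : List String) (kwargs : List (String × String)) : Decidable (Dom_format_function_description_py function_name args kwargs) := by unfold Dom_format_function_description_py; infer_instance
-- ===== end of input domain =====

-- B streams once over the input — char-wise underscore substitution for the name and a
-- single optional accumulator threaded through args then kwargs — replacing A's
-- split/join and two joined strings with a truthiness cascade (objective: alternative).


-- ===== PORT A =====
def format_function_description_py (function_name : String) (args : List String) (kwargs : List (String × String)) : String :=
  -- '_' is a nonempty literal separator, so split? is always some; getD [] never fires
  let readable_name := PySem.Str.join " " ((PySem.Str.split? function_name "_").getD [])
  let args_str := PySem.Str.join ", " args          -- str(arg) = arg for string args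
  let kwargs_str := PySem.Str.join ", " (kwargs.map (fun kv => kv.1 ++ "=" ++ kv.2))
  let params_str : String :=
    if args_str ≠ "" ∧ kwargs_str ≠ "" then args_str ++ ", " ++ kwargs_str
    else if args_str ≠ "" then args_str
    else if kwargs_str ≠ "" then kwargs_str
    else ""
  if params_str ≠ "" then readable_name ++ " with parameters: " ++ params_str
  else readable_name

-- ===== PORT B =====
-- Source B's loop body: 'params = s if params is None else f"{params}, {s}"'
def pvStepParam (acc : Option String) (s : String) : Option String :=
  some (match acc with
        | none => s
        | some p => p ++ ", " ++ s)

def format_function_description_py_alt (function_name : String) (args : List String) (kwargs : List (String × String)) : String :=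
  -- '"".join(" " if c == "_" else c for c in function_name)': generator of 1-char strings
  let readable_name := String.ofList (PySem.Chars.join [] (function_name.toList.map (fun c => if c = '_' then [' '] else [c])))
  let paramsArgs := args.foldl pvStepParam none
  let params := (kwargs.map (fun kv => kv.1 ++ "=" ++ kv.2)).foldl pvStepParam paramsArgs
  match params with
  | none => readable_name                       -- 'if params:' — None is falsy
  | some p =>
    if p ≠ "" then readable_name ++ " with parameters: " ++ p   -- '' is falsy too
    else readable_name

-- ===== PRECONDITION & SPEC =====
-- Pre_ excludes exactly args == [""] with nonempty kwargs: there A's truthiness test on the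
-- joined args string silently drops the single empty-string positional argument while B keeps
-- it as a leading ", "; both renderings of this degenerate corner are defensible artefacts.
def Pre_format_function_description_py (_function_name : String) (args : List String) (kwargs : List (String × String)) : Prop :=
  ¬ (args = [""] ∧ kwargs ≠ [])
instance (function_name : String) (args : List String) (kwargs : List (String × String)) : Decidable (Pre_format_function_description_py function_name args kwargs) := by unfold Pre_format_function_description_py; infer_instance

def pvWitness_format_function_description_py : String × List String × (List (String × String)) :=
  ("do_thing", ["1"], [("k", "v")])

def Spec_format_function_description_py (function_name : String) (args : List String) (kwargs : List (String × String)) (out : String) : Prop := out = format_function_description_py_alt function_name args kwargs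
instance (function_name : String) (args : List String) (kwargs : List (String × String)) (out : String) : Decidable (Spec_format_function_description_py function_name args kwargs out) := by unfold Spec_format_function_description_py; infer_instance

-- ===== CLAIM (what is proved, stated in full; the proofs are below) =====
def Claim_equal_format_function_description_py : Prop := ∀ (function_name : String) (args : List String) (kwargs : List (String × String)), Dom_format_function_description_py function_name args kwargs → Pre_format_function_description_py function_name args kwargs → Spec_format_function_description_py function_name args kwargs (format_function_description_py function_name args kwargs)

-- ===== LEMMAS AND PROOFS =====

-- the char substitution performed by B's name pass
def pvSubChar (c : Char) : Char := if c = '_' then ' ' else c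

-- join over a concatenation of two nonempty lists splits at the separator
lemma join_append_of_ne_nil (sep : List Char) (xs ys : List (List Char))
    (hx : xs ≠ []) (hy : ys ≠ []) :
    PySem.Chars.join sep (xs ++ ys) = PySem.Chars.join sep xs ++ sep ++ PySem.Chars.join sep ys := by
  induction xs with
  | nil => exact absurd rfl hx
  | cons a t ih =>
    cases t with
    | nil =>
      obtain ⟨y, ys', rfl⟩ := List.exists_cons_of_ne_nil hy
      simp [PySem.Chars.join_cons_cons, PySem.Chars.join_singleton]
    | cons b t' =>
      simp only [List.cons_append] at ih ⊢
      rw [PySem.Chars.join_cons_cons sep a b (t' ++ ys),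
          PySem.Chars.join_cons_cons sep a b t', ih (by simp)]
      simp

-- a nonempty-separator join is empty only for [] or [[]]
lemma join_eq_nil (sep : List Char) (hsep : sep ≠ []) (xs : List (List Char))
    (h : PySem.Chars.join sep xs = []) : xs = [] ∨ xs = [[]] := by
  cases xs with
  | nil => exact Or.inl rfl
  | cons a t =>
    cases t with
    | nil =>
      rw [PySem.Chars.join_singleton] at h
      exact Or.inr (by simp [h])
    | cons b t' =>
      rw [PySem.Chars.join_cons_cons] at h
      simp [hsep] at h

-- a join whose first part is nonempty is nonempty
lemma join_ne_nil_of_head (sep p : List Char) (rest : List (List Char)) (hp : p ≠ []) :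
    PySem.Chars.join sep (p :: rest) ≠ [] := by
  cases rest with
  | nil => rw [PySem.Chars.join_singleton]; exact hp
  | cons q r => rw [PySem.Chars.join_cons_cons]; simp [hp]

-- extending the last part of a join appends after the join
lemma join_last_append (sep : List Char) (xs : List (List Char)) (y z : List Char) :
    PySem.Chars.join sep (xs ++ [y ++ z]) = PySem.Chars.join sep (xs ++ [y]) ++ z := by
  cases xs with
  | nil => simp [PySem.Chars.join_singleton]
  | cons a t =>
    rw [join_append_of_ne_nil sep (a :: t) [y ++ z] (by simp) (by simp),
        join_append_of_ne_nil sep (a :: t) [y] (by simp) (by simp)]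
    simp [PySem.Chars.join_singleton]

-- invariant of splitOn's worker for the one-char separator '_', joined back with ' '
lemma go_join (fuel : Nat) : ∀ (l cur : List Char) (acc : List (List Char)),
    l.length ≤ fuel →
    PySem.Chars.join [' '] (PySem.Chars.splitOn.go ['_'] fuel l cur acc)
      = PySem.Chars.join [' '] (acc.reverse ++ [cur.reverse]) ++ l.map pvSubChar := by
  induction fuel with
  | zero =>
    intro l cur acc h
    have hl : l = [] := List.eq_nil_of_length_eq_zero (Nat.le_zero.mp h)
    subst hl
    rw [PySem.Chars.splitOn.go.eq_def]
    simp
  | succ fuel ih =>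
    intro l cur acc h
    cases l with
    | nil =>
      rw [PySem.Chars.splitOn.go.eq_def]
      simp
    | cons c rest =>
      rw [PySem.Chars.splitOn.go.eq_def]
      simp only [List.isPrefixOf, Bool.and_true, List.length_cons] at *
      by_cases hc : c = '_'
      · subst hc
        simp only [beq_self_eq_true, if_pos, List.drop_succ_cons, List.length_nil, List.drop_zero]
        rw [ih rest [] (cur.reverse :: acc) (by omega)]
        have : (cur.reverse :: acc).reverse ++ [List.reverse []]
            = (acc.reverse ++ [cur.reverse]) ++ [[]] := by simp
        rw [this,
            join_append_of_ne_nil [' '] (acc.reverse ++ [cur.reverse]) [[]] (by simp) (by simp),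
            PySem.Chars.join_singleton]
        simp [pvSubChar]
      · have hbeq : ('_' == c) = false := by
          simp [beq_eq_false_iff_ne]; exact fun h' => hc h'.symm
        simp only [hbeq, Bool.false_eq_true, if_false]
        rw [ih rest (c :: cur) acc (by omega)]
        have : (c :: cur).reverse = cur.reverse ++ [c] := by simp
        rw [this, join_last_append]
        simp [pvSubChar, hc]

-- A's split+join name equals B's char-wise substitution
lemma name_eq (fn : String) :
    PySem.Str.join " " ((PySem.Str.split? fn "_").getD [])
      = String.ofList (PySem.Chars.join [] (fn.toList.map (fun c => if c = '_' then [' '] else [c]))) := by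
  have hB : PySem.Chars.join [] (fn.toList.map (fun c => if c = '_' then [' '] else [c]))
      = fn.toList.map pvSubChar := by
    have : fn.toList.map (fun c => if c = '_' then [' '] else [c])
        = (fn.toList.map pvSubChar).map (fun c => [c]) := by
      rw [List.map_map]; apply List.map_congr_left
      intro c _; by_cases hc : c = '_' <;> simp [pvSubChar, hc]
    rw [this, PySem.Chars.join_nil_singletons]
  apply String.ext   -- strings equal iff their char lists are
  rw [hB, String.toList_ofList]
  have hsplit : PySem.Str.split? fn "_"
      = some ((PySem.Chars.splitOn fn.toList ['_']).map String.ofList) := by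
    show Option.map _ (PySem.Chars.split? fn.toList "_".toList) = _
    simp [PySem.Chars.split?]
  rw [hsplit, Option.getD_some, PySem.Str.toList_join, List.map_map]
  have hid : (String.toList ∘ String.ofList) = id := by
    funext l; simp
  rw [hid, List.map_id]
  show PySem.Chars.join " ".toList (PySem.Chars.splitOn.go ['_'] (fn.toList.length + 1) fn.toList [] []) = _
  have hsep : (" " : String).toList = [' '] := rfl
  rw [hsep, go_join (fn.toList.length + 1) fn.toList [] [] (by omega)]
  simp [PySem.Chars.join_singleton]

-- Str-level join facts used to characterise B's accumulator fold
lemma str_join_singleton (p : String) : PySem.Str.join ", " [p] = p := by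
  apply String.ext
  rw [PySem.Str.toList_join]
  simp [PySem.Chars.join_singleton]

lemma str_join_cons_cons (p q : String) (rest : List String) :
    PySem.Str.join ", " (p :: q :: rest) = p ++ ", " ++ PySem.Str.join ", " (q :: rest) := by
  apply String.ext
  simp [PySem.Str.toList_join, List.map_cons, PySem.Chars.join_cons_cons]

lemma str_join_absorb (a b : String) (rest : List String) :
    PySem.Str.join ", " ((a ++ ", " ++ b) :: rest) = a ++ ", " ++ PySem.Str.join ", " (b :: rest) := by
  apply String.ext
  rw [PySem.Str.toList_join]
  cases rest with
  | nil => simp [PySem.Chars.join_singleton, PySem.Str.toList_join]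
  | cons q r =>
    simp [PySem.Str.toList_join, List.map_cons, PySem.Chars.join_cons_cons, List.append_assoc]

-- B's fold from a some-state builds exactly the comma-join with that head
lemma fold_step_some (parts : List String) : ∀ (p : String),
    parts.foldl pvStepParam (some p) = some (PySem.Str.join ", " (p :: parts)) := by
  induction parts with
  | nil => intro p; simp [List.foldl, str_join_singleton]
  | cons q rest ih =>
    intro p
    show rest.foldl pvStepParam (pvStepParam (some p) q) = _
    have : pvStepParam (some p) q = some (p ++ ", " ++ q) := rfl
    rw [this, ih (p ++ ", " ++ q), str_join_absorb, str_join_cons_cons]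

-- B's whole fold over the combined parts list
lemma fold_step_none (parts : List String) :
    parts.foldl pvStepParam none
      = match parts with
        | [] => none
        | a :: rest => some (PySem.Str.join ", " (a :: rest)) := by
  cases parts with
  | nil => rfl
  | cons a rest =>
    show rest.foldl pvStepParam (pvStepParam none a) = _
    have : pvStepParam none a = some a := rfl
    rw [this, fold_step_some]

-- A's cascaded params string equals the single join over the combined list, under Pre_
lemma params_eq (args : List String) (kwargs : List (String × String))
    (hpre : ¬ (args = [""] ∧ kwargs ≠ [])) :
    (let args_str := PySem.Str.join ", " args
     let kwargs_str := PySem.Str.join ", " (kwargs.map (fun kv => kv.1 ++ "=" ++ kv.2))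
     if args_str ≠ "" ∧ kwargs_str ≠ "" then args_str ++ ", " ++ kwargs_str
     else if args_str ≠ "" then args_str
     else if kwargs_str ≠ "" then kwargs_str
     else "")
    = PySem.Str.join ", " (args ++ kwargs.map (fun kv => kv.1 ++ "=" ++ kv.2)) := by
  simp only []
  have hstr : ∀ a b : String, a = b ↔ a.toList = b.toList := fun a b => String.ext_iff
  cases hkw : kwargs with
  | nil =>
    simp only [List.map_nil, List.append_nil, PySem.Str.join]
    by_cases ha : PySem.Str.join ", " args = ""
    · simp
    · simp
  | cons kv kws =>
    have hkne : PySem.Str.join ", " (List.map (fun kv => kv.1 ++ "=" ++ kv.2) (kv :: kws)) ≠ "" := by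
      intro h
      have h' := (hstr _ _).mp h
      rw [PySem.Str.toList_join, List.map_map, List.map_cons] at h'
      exact join_ne_nil_of_head _ _ _ (by simp) h'
    cases hargs : args with
    | nil =>
      have h0 : PySem.Str.join ", " ([] : List String) = "" := rfl
      simp [h0]
    | cons a t =>
      have hane : PySem.Str.join ", " (a :: t) ≠ "" := by
        intro h
        rw [hstr] at h
        rw [PySem.Str.toList_join] at h
        rcases join_eq_nil _ (by decide) _ h with h' | h'
        · simp at h'
        · rw [List.map_cons] at h'
          have : a.toList = ([] : List Char) ∧ List.map String.toList t = [] := by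
            constructor
            · exact List.head_eq_of_cons_eq h'
            · exact List.tail_eq_of_cons_eq h'
          have ht : t = [] := by
            have := this.2; cases t with
            | nil => rfl
            | cons x xs => simp at this
          have haq : a = "" := by rw [hstr]; exact this.1
          exact hpre ⟨by rw [hargs, ht, haq], by rw [hkw]; simp⟩
      simp only [hane, hkne, ne_eq, not_false_iff, and_self, if_pos]
      rw [hstr]
      simp only [String.toList_append, PySem.Str.toList_join, List.map_append]
      rw [join_append_of_ne_nil _ _ _ (by simp) (by simp)]

-- ===== VERDICT (by name: the statement is the Claim_ definition above) =====
theorem format_function_description_py_spec : Claim_equal_format_function_description_py := by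
  intro fn args kwargs _ hpre
  unfold Spec_format_function_description_py format_function_description_py format_function_description_py_alt
  simp only []
  rw [params_eq args kwargs hpre, List.foldl_append.symm, fold_step_none, ← name_eq fn]
  cases hc : args ++ kwargs.map (fun kv => kv.1 ++ "=" ++ kv.2) with
  | nil =>
    have : PySem.Str.join ", " ([] : List String) = "" := rfl
    simp [this]
  | cons a rest => rfl
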